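-- pv_equiv track=rewrite | github.com/xDamager1/- | курсач.py | find_one_solution
-- ===== SOURCE A (Python) =====
-- from typing import List, Tuple, Optional
--
-- Coord = Tuple[int, int]
--
-- class Board:
--     """Класс, представляющий шахматную доску с размещенными пони."""
--
--     def __init__(self, size: int, occupied: List[Coord] = None):
--         if occupied is None:
--             occupied = []
--         self.size = size
--         self.occupied = list(occupied)
--
--     def attacked_positions(self) -> List[Coord]:
--         """
--         Возвращает список атакованных позиций на доске.
--
--         :return: Список координат (x, y), находящихся под атакой размещенных пони.
--         """
--         attacks = set()
--
--         for x0, y0 in self.occupied: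
--             for dx, dy in PONY_MOVES:
--                 x, y = x0 + dx, y0 + dy
--
--                 if 0 <= x < self.size and 0 <= y < self.size:
--                     attacks.add((x, y))
--
--         return list(attacks)
--
--     def is_safe(self, pos: Coord) -> bool:
--         """
--         Проверяет, безопасна ли позиция для размещения нового пони.
--
--         :param pos: Координаты (x, y) для проверки
--
--         :return: True если позиция безопасна, False в противном случае
--
--         """
--         if pos in self.occupied:
--             return False
--
--         for occ in self.occupied:
--             dx = abs(pos[0] - occ[0])
--             dy = abs(pos[1] - occ[1])
--
--             if (dx, dy) in [(1, 2), (2, 1), (1, 3), (3, 1)]: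
--                 return False
--
--         return True
--
--     def place(self, pos: Coord):
--         """
--         Размещает пони на доске, если позиция безопасна.
--
--         :param pos: Координаты (x, y) для размещения
--
--         """
--         if self.is_safe(pos):
--             self.occupied.append(pos)
--
-- def find_one_solution(initial_coords: List[Coord], N: int, L: int) -> Optional[List[Coord]]:
--     """
--     Находит одно решение для размещения L пони на доске NxN с начальными координатами.
--
--     :param initial_coords: Начальные координаты размещенных пони
--
--     :param N: Размер доски
--
--     :param L: Количество дополнительных пони для размещения
--
--     :return: Список координат дополнительных пони или None, если решение не найдено
--
--     """
--     solution: List[Coord] = []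
--
--     def backtrack(start: int, need: int, occ: List[Coord]) -> bool:
--         if need == 0:
--             solution.extend(occ[len(initial_coords):])
--             return True
--
--         for i in range(start, N * N):
--             x, y = divmod(i, N)
--
--             if Board(N, occ).is_safe((x, y)):
--                 occ.append((x, y))
--
--                 if backtrack(i + 1, need - 1, occ):
--                     return True
--
--                 occ.pop()
--
--         return False
--
--     occ_copy = initial_coords.copy()
--     if backtrack(0, L, occ_copy):
--         return solution
--
--     return None
-- ===== SOURCE B (Python) =====
-- # Per-cell place/skip recursion instead of A's per-piece loop with Board rebuilds:
-- # each cell is either taken (if unattacked, tracked in an incrementally maintained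
-- # occupancy set) or skipped, and the answer is built functionally by list cons.
-- from typing import List, Tuple, Optional
--
-- Coord = Tuple[int, int]
--
-- _DELTAS = [(sx * dx, sy * dy)
--            for dx, dy in ((1, 2), (2, 1), (1, 3), (3, 1))
--            for sx in (1, -1) for sy in (1, -1)]
--
-- def find_one_solution(initial_coords: List[Coord], N: int, L: int) -> Optional[List[Coord]]:
--     occ = set(initial_coords)
--     total = N * N
--
--     def safe(x: int, y: int) -> bool:
--         if (x, y) in occ:
--             return False
--         return all((x + dx, y + dy) not in occ for dx, dy in _DELTAS)
--
--     def search(i: int, need: int) -> Optional[List[Coord]]: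
--         if need == 0:
--             return []
--         if i >= total:
--             return None
--         x, y = divmod(i, N)
--         if safe(x, y):
--             occ.add((x, y))
--             rest = search(i + 1, need - 1)
--             occ.remove((x, y))
--             if rest is not None:
--                 return [(x, y)] + rest
--         return search(i + 1, need)
--
--     return search(0, L)
-- ===== Notes on version B (the rewrite author's own statement) =====
-- stated objective: alternative
-- what changed: A runs a per-piece for-loop over cells, rebuilding a Board object and scanning the whole occupied list at every candidate and collecting the answer into a shared mutable solution list; B has no loop at all: a per-cell place/skip binary recursion over (cell index, pieces still needed), with occupancy kept in a set maintained by add/remove and safety decided by 16 fixed offset lookups, and the answer built functionally by list cons on return.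
import Mathlib
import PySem

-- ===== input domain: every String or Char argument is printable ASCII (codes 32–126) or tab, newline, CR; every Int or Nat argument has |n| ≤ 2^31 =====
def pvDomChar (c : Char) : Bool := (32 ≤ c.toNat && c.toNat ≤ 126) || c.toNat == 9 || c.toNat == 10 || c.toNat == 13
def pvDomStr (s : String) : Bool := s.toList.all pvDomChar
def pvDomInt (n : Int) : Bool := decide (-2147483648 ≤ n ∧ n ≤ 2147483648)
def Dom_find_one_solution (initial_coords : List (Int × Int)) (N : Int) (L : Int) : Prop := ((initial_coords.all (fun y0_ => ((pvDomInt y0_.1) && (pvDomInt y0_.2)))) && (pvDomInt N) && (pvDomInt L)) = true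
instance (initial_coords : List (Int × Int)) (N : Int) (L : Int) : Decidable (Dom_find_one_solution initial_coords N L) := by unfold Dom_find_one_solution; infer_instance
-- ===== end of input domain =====

-- B replaces A's per-piece loop with Board rebuilds and occupied-list scans by a per-cell
-- place/skip recursion over an incrementally maintained occupancy set, building the answer by cons.


-- ===== PORT A =====
-- Board(N, occ).is_safe(pos): membership scan + knight-distance scan over the whole occupied list
def pvKnightA (pos o : Int × Int) : Bool :=
  let dx := (pos.1 - o.1).natAbs
  let dy := (pos.2 - o.2).natAbs
  [((1:Nat),(2:Nat)),(2,1),(1,3),(3,1)].contains (dx, dy)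

def pvIsSafeA (occ : List (Int × Int)) (pos : Int × Int) : Bool :=
  if occ.contains pos then false
  else ! occ.any (fun occ_ => pvKnightA pos occ_)

-- backtrack(start, need, occ); the loop 'for i in range(start, N*N)' is carried as the remaining
-- cell index (the recursive call backtrack(i+1, …) continues on exactly the tail).
-- divmod(i, N): cells come from range(0, N*N), nonempty only when N ≠ 0, so floordiv/mod are exact there.
-- fuel = number of cells left in range(start, N*N): a totality guard only, never reached
-- before the range is exhausted (the wrapper passes exactly (N*N - start).toNat).
def pvBtA (N : Int) (fuel : Nat) (need : Int) (occ : List (Int × Int)) (start : Int) :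
    Option (List (Int × Int)) :=
  if need == 0 then some occ
  else match fuel with
  | 0 => none
  | fuel' + 1 =>
    if start < N * N then
      let x := PySem.Int.floordiv start N
      let y := PySem.Int.mod start N
      if pvIsSafeA occ (x, y) then
        match pvBtA N fuel' (need - 1) (occ ++ [(x, y)]) (start + 1) with
        | some s => some s
        | none => pvBtA N fuel' need occ (start + 1)
      else pvBtA N fuel' need occ (start + 1)
    else none

def find_one_solution (initial_coords : List (Int × Int)) (N : Int) (L : Int) :
    Option (List (Int × Int)) :=
  match pvBtA N (N * N).toNat L initial_coords 0 with
  | some occF => some (occF.drop initial_coords.length)   -- solution = occ[len(initial_coords):]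
  | none => none

-- ===== PORT B =====
-- occupancy kept in a set; safety = 16 fixed offset lookups
def pvDeltas : List (Int × Int) :=
  [(1,2),(1,-2),(-1,2),(-1,-2),(2,1),(2,-1),(-2,1),(-2,-1),
   (1,3),(1,-3),(-1,3),(-1,-3),(3,1),(3,-1),(-3,1),(-3,-1)]

def pvSafeB (occ : PySem.Set (Int × Int)) (x y : Int) : Bool :=
  if PySem.Set.contains occ (x, y) then false
  else pvDeltas.all (fun d => ! PySem.Set.contains occ (x + d.1, y + d.2))

-- search(i, need): place the current cell (if safe) or skip it; the occ.add/occ.remove pair of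
-- the Python is the extended set passed only to the 'place' branch; [(x,y)] + rest is the cons.
-- fuel: same totality guard (cells left in range(i, N*N)); the wrapper passes (N*N).toNat.
def pvSearchB (N : Int) (occ : PySem.Set (Int × Int)) (fuel : Nat) (i : Int) (need : Int) :
    Option (List (Int × Int)) :=
  if need == 0 then some []
  else match fuel with
  | 0 => none
  | fuel' + 1 =>
    if i < N * N then
      let x := PySem.Int.floordiv i N
      let y := PySem.Int.mod i N
      if pvSafeB occ x y then
        match pvSearchB N (PySem.Set.add occ (x, y)) fuel' (i + 1) (need - 1) with
        | some rest => some ((x, y) :: rest)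
        | none => pvSearchB N occ fuel' (i + 1) need
      else pvSearchB N occ fuel' (i + 1) need
    else none

def find_one_solution_alt (initial_coords : List (Int × Int)) (N : Int) (L : Int) :
    Option (List (Int × Int)) :=
  pvSearchB N (PySem.Set.ofList initial_coords) (N * N).toNat 0 L

-- ===== PRECONDITION & SPEC =====
def Spec_find_one_solution (initial_coords : List (Int × Int)) (N : Int) (L : Int) (out : Option (List (Int × Int))) : Prop := out = find_one_solution_alt initial_coords N L
instance (initial_coords : List (Int × Int)) (N : Int) (L : Int) (out : Option (List (Int × Int))) : Decidable (Spec_find_one_solution initial_coords N L out) := by unfold Spec_find_one_solution; infer_instance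

-- ===== CLAIM (what is proved, stated in full; the proofs are below) =====
def Claim_equal_find_one_solution : Prop := ∀ (initial_coords : List (Int × Int)) (N : Int) (L : Int), Dom_find_one_solution initial_coords N L → Spec_find_one_solution initial_coords N L (find_one_solution initial_coords N L)

-- ===== LEMMAS AND PROOFS =====

-- knight-distance from pos to o  ⟺  o is pos shifted by one of the 16 offsets
theorem pvKnight_iff (x y a b : Int) :
    pvKnightA (x, y) (a, b) = pvDeltas.any (fun d => (x + d.1, y + d.2) == (a, b)) := by
  rw [Bool.eq_iff_iff]
  simp only [pvKnightA, List.contains_iff_mem, List.mem_cons, List.not_mem_nil, or_false,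
    Prod.mk.injEq, List.any_eq_true, beq_iff_eq]
  constructor
  · rintro (⟨h1, h2⟩ | ⟨h1, h2⟩ | ⟨h1, h2⟩ | ⟨h1, h2⟩)
    · refine ⟨(a - x, b - y), ?_, by omega⟩
      have hx : a - x = 1 ∨ a - x = -1 := by omega
      have hy : b - y = 2 ∨ b - y = -2 := by omega
      rcases hx with hx | hx <;> rcases hy with hy | hy <;> rw [hx, hy] <;> decide
    · refine ⟨(a - x, b - y), ?_, by omega⟩
      have hx : a - x = 2 ∨ a - x = -2 := by omega
      have hy : b - y = 1 ∨ b - y = -1 := by omega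
      rcases hx with hx | hx <;> rcases hy with hy | hy <;> rw [hx, hy] <;> decide
    · refine ⟨(a - x, b - y), ?_, by omega⟩
      have hx : a - x = 1 ∨ a - x = -1 := by omega
      have hy : b - y = 3 ∨ b - y = -3 := by omega
      rcases hx with hx | hx <;> rcases hy with hy | hy <;> rw [hx, hy] <;> decide
    · refine ⟨(a - x, b - y), ?_, by omega⟩
      have hx : a - x = 3 ∨ a - x = -3 := by omega
      have hy : b - y = 1 ∨ b - y = -1 := by omega
      rcases hx with hx | hx <;> rcases hy with hy | hy <;> rw [hx, hy] <;> decide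
  · rintro ⟨⟨d1, d2⟩, hd, heq⟩
    simp only [pvDeltas, List.mem_cons, List.not_mem_nil, or_false, Prod.mk.injEq] at hd
    rcases hd with (⟨e1, e2⟩ | ⟨e1, e2⟩ | ⟨e1, e2⟩ | ⟨e1, e2⟩ | ⟨e1, e2⟩ | ⟨e1, e2⟩ | ⟨e1, e2⟩ |
      ⟨e1, e2⟩ | ⟨e1, e2⟩ | ⟨e1, e2⟩ | ⟨e1, e2⟩ | ⟨e1, e2⟩ | ⟨e1, e2⟩ | ⟨e1, e2⟩ | ⟨e1, e2⟩ |
      ⟨e1, e2⟩) <;> omega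

-- A's occupied-list scan equals B's offset scan, as a membership test
theorem pvScan_eq (occ : List (Int × Int)) (x y : Int) :
    (occ.any fun occ_ => pvKnightA (x, y) occ_) =
      pvDeltas.any (fun d => occ.contains (x + d.1, y + d.2)) := by
  rw [Bool.eq_iff_iff]
  simp only [List.any_eq_true, List.contains_iff_mem]
  constructor
  · rintro ⟨⟨a, b⟩, hab, hk⟩
    rw [pvKnight_iff] at hk
    simp only [List.any_eq_true, beq_iff_eq] at hk
    obtain ⟨d, hd, hde⟩ := hk
    exact ⟨d, hd, hde ▸ hab⟩
  · rintro ⟨d, hd, hmem⟩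
    refine ⟨_, hmem, ?_⟩
    rw [pvKnight_iff]
    simp only [List.any_eq_true, beq_iff_eq]
    exact ⟨d, hd, rfl⟩

-- the two safety checks agree whenever the set and the list have the same members
theorem pvSafe_eq (occ : List (Int × Int)) (s : PySem.Set (Int × Int)) (x y : Int)
    (hs : ∀ p, p ∈ s ↔ p ∈ occ) :
    pvSafeB s x y = pvIsSafeA occ (x, y) := by
  have hc : ∀ p, PySem.Set.contains s p = occ.contains p := by
    intro p
    rw [Bool.eq_iff_iff]
    simp only [PySem.Set.contains, List.contains_iff_mem, hs p]
  simp only [pvSafeB, pvIsSafeA, hc, pvScan_eq]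
  rw [List.not_any_eq_all_not]

-- main invariant: with the same occupancy (s ~ occL), A's per-piece loop from cell 'start'
-- returns exactly occL ++ B's cons-built result; induction on the remaining-cell count
theorem pvBt_eq (N : Int) :
    ∀ (fuel : Nat) (start need : Int) (occL : List (Int × Int)) (s : PySem.Set (Int × Int)),
      (∀ p, p ∈ s ↔ p ∈ occL) →
      pvBtA N fuel need occL start =
        (pvSearchB N s fuel start need).map (fun rest => occL ++ rest) := by
  intro fuel
  induction fuel with
  | zero =>
    intro start need occL s hs
    rw [pvBtA, pvSearchB]
    by_cases h0 : need == 0 <;> simp [h0]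
  | succ fuel' ih =>
    intro start need occL s hs
    rw [pvBtA, pvSearchB]
    by_cases h0 : need == 0
    · simp [h0]
    · simp only [h0, Bool.false_eq_true, if_false]
      by_cases hlt : start < N * N
      · rw [if_pos hlt, if_pos hlt]
        rw [pvSafe_eq occL s _ _ hs]
        set c : Int × Int := (PySem.Int.floordiv start N, PySem.Int.mod start N) with hc
        by_cases hsafe : pvIsSafeA occL c = true
        · simp only [hsafe, if_true]
          have hs' : ∀ p, p ∈ PySem.Set.add s c ↔ p ∈ occL ++ [c] := by
            intro p
            rw [PySem.Set.mem_add]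
            simp [hs p, or_comm]
          rw [ih (start + 1) (need - 1) (occL ++ [c]) (PySem.Set.add s c) hs']
          cases pvSearchB N (PySem.Set.add s c) fuel' (start + 1) (need - 1) with
          | some rest => simp
          | none => simpa using ih (start + 1) need occL s hs
        · simp only [hsafe]
          exact ih (start + 1) need occL s hs
      · rw [if_neg hlt, if_neg hlt]
        rfl

-- ===== VERDICT (by name: the statement is the Claim_ definition above) =====
theorem find_one_solution_spec : Claim_equal_find_one_solution := by
  intro init N L _
  unfold Spec_find_one_solution find_one_solution find_one_solution_alt
  have h := pvBt_eq N (N * N).toNat 0 L init (PySem.Set.ofList init)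
    (by intro p; simp [PySem.Set.mem_ofList])
  rw [h]
  cases pvSearchB N (PySem.Set.ofList init) (N * N).toNat 0 L with
  | none => rfl
  | some rest => simp
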